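-- pv_equiv track=rewrite | github.com/aysh34/CALICO-Informatics-Competition | bizzfuz.py | solve
-- ===== SOURCE A (Python) =====
-- def solve(W1: str, W2: str) -> str:
--     """
--     Return the string containing the word you should say
--
--     W1: the second-to-last word said
--     W2: the last word said
--     """
--
--     # YOUR CODE HERE
--     def convert(n):
--         if n % 15 == 0:
--             return "bizzfuzz"
--         if n % 3 == 0:
--             return "bizz"
--         if n % 5 == 0:
--             return "fuzz"
--         return str(n)
--
--     possible = []
--     if W1.isdigit():
--         possible = [int(W1)]
--     elif W1 == "bizz":
--         possible = [i for i in range(3, 101, 3) if i % 5 != 0]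
--     elif W1 == "fuzz":
--         possible = [i for i in range(5, 101, 5) if i % 3 != 0]
--     elif W1 == "bizzfuzz":
--         possible = [i for i in range(15, 101, 15)]
--
--     answers = set()
--     for n in possible:
--         if convert(n + 1) == W2:
--             answers.add(convert(n + 2))
--
--     if len(answers) == 1:
--         return list(answers)[0]
--     else:
--         return "crap"
-- ===== SOURCE B (Python) =====
-- def solve(W1: str, W2: str) -> str:
--     """
--     Return the string containing the word you should say
--
--     W1: the second-to-last word said
--     W2: the last word said
--     """
--
--     def convert(n):
--         if n % 15 == 0:
--             return "bizzfuzz"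
--         if n % 3 == 0:
--             return "bizz"
--         if n % 5 == 0:
--             return "fuzz"
--         return str(n)
--
--     if W1.isdigit():
--         n = int(W1)
--         return convert(n + 2) if convert(n + 1) == W2 else "crap"
--
--     # index every consecutive pair of the BizzFuzz sequence 1..100
--     index = {}
--     for n in range(1, 101):
--         key = (convert(n), convert(n + 1))
--         index.setdefault(key, set()).add(convert(n + 2))
--
--     answers = index.get((W1, W2), set())
--     if len(answers) == 1:
--         return next(iter(answers))
--     return "crap"
-- ===== Notes on version B (the rewrite author's own statement) =====
-- stated objective: alternative
-- what changed: B answers non-digit W1 by one precomputed dict indexing every consecutive pair (convert(n), convert(n+1)) of the 1..100 BizzFuzz sequence to the set of possible next words, replacing A's per-branch candidate-range scan and filter; the digit branch is answered directly without building a candidate list or a set.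
import Mathlib
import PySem

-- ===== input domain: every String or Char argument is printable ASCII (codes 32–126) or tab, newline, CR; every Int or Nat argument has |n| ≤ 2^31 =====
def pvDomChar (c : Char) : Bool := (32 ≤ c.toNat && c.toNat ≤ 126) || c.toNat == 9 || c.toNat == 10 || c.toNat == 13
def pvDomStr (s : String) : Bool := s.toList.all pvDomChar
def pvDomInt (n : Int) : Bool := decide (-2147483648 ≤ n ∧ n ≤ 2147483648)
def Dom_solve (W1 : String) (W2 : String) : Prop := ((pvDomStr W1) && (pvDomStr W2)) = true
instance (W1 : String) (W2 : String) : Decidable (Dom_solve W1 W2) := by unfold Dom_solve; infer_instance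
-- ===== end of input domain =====

-- B replaces A's per-branch candidate scan by one precomputed pair→answers index over the
-- sequence 1..100 (objective: alternative decomposition; the digit branch stays direct).

-- ===== PORT A =====
def pvConvertA (n : Int) : String :=
  if PySem.Int.mod n 15 = 0 then "bizzfuzz"
  else if PySem.Int.mod n 3 = 0 then "bizz"
  else if PySem.Int.mod n 5 = 0 then "fuzz"
  else PySem.Int.toStr n

def solve (W1 : String) (W2 : String) : String :=
  let possible : List Int :=
    if PySem.Str.strIsdigit W1 = true then
      [(PySem.Int.ofStr? W1).getD 0]   -- int(W1): succeeds since W1.isdigit() (ASCII domain)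
    else if W1 = "bizz" then
      (PySem.List.pyRange 3 101 3).filter (fun i => !(PySem.Int.mod i 5 == 0))
    else if W1 = "fuzz" then
      (PySem.List.pyRange 5 101 5).filter (fun i => !(PySem.Int.mod i 3 == 0))
    else if W1 = "bizzfuzz" then
      PySem.List.pyRange 15 101 15
    else []
  let answers : PySem.Set String :=
    possible.foldl
      (fun s n => if pvConvertA (n + 1) = W2 then PySem.Set.add s (pvConvertA (n + 2)) else s)
      PySem.Set.empty
  if PySem.Set.len answers = 1 then answers.headD "crap" else "crap"

-- ===== PORT B =====  (B's convert is the same function as A's; pvConvertA is shared)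
-- index[(convert(n), convert(n+1))] ∋ convert(n+2) for n in range(1, 101)
def pvIndex : PySem.Dict (String × String) (PySem.Set String) :=
  (PySem.List.pyRange 1 101 1).foldl
    (fun d n =>
      d.modify (pvConvertA n, pvConvertA (n + 1)) PySem.Set.empty
        (fun s => PySem.Set.add s (pvConvertA (n + 2))))
    PySem.Dict.empty

def solve_alt (W1 : String) (W2 : String) : String :=
  if PySem.Str.strIsdigit W1 = true then
    let n := (PySem.Int.ofStr? W1).getD 0
    if pvConvertA (n + 1) = W2 then pvConvertA (n + 2) else "crap"
  else
    let answers : PySem.Set String := pvIndex.getD (W1, W2) PySem.Set.empty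
    if PySem.Set.len answers = 1 then answers.headD "crap" else "crap"

-- ===== PRECONDITION & SPEC =====
def Spec_solve (W1 : String) (W2 : String) (out : String) : Prop := out = solve_alt W1 W2
instance (W1 : String) (W2 : String) (out : String) : Decidable (Spec_solve W1 W2 out) := by unfold Spec_solve; infer_instance

-- ===== CLAIM (what is proved, stated in full; the proofs are below) =====
def Claim_equal_solve : Prop := ∀ (W1 : String) (W2 : String), Dom_solve W1 W2 → Spec_solve W1 W2 (solve W1 W2)

-- ===== LEMMAS AND PROOFS =====

-- the words that can follow each non-digit word in the 1..100 window
def pvSb : List String :=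
  ["4", "7", "13", "19", "22", "28", "34", "37", "43", "49", "52", "58", "64", "67", "73",
   "79", "82", "88", "94", "97", "fuzz"]
def pvSf : List String := ["11", "26", "41", "56", "71", "86", "101", "bizz"]
def pvSz : List String := ["16", "31", "46", "61", "76", "91"]

theorem pv_fold_none (l : List Int) (W2 : String) (s0 : PySem.Set String)
    (h : ∀ n ∈ l, pvConvertA (n + 1) ≠ W2) :
    l.foldl
      (fun s n => if pvConvertA (n + 1) = W2 then PySem.Set.add s (pvConvertA (n + 2)) else s)
      s0 = s0 := by
  induction l generalizing s0 with
  | nil => rfl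
  | cons a t ih =>
      simp only [List.foldl_cons, if_neg (h a (List.mem_cons_self))]
      exact ih s0 (fun n hn => h n (List.mem_cons_of_mem _ hn))

theorem pv_getD_not_mem (k : String × String) (h : k ∉ pvIndex.keys) :
    pvIndex.getD k PySem.Set.empty = PySem.Set.empty := by
  apply PySem.Dict.getD_of_not_contains
  rw [Bool.eq_false_iff]
  intro hc
  exact h ((PySem.Dict.contains_iff_mem_keys _ _).mp hc)

set_option maxRecDepth 100000 in
theorem pv_keys_shape : ∀ k ∈ pvIndex.keys,
    (PySem.Str.strIsdigit k.1 = true ∧ ¬ (k.1 = "bizz" ∨ k.1 = "fuzz" ∨ k.1 = "bizzfuzz")) ∨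
    (k.1 = "bizz" ∧ k.2 ∈ pvSb) ∨ (k.1 = "fuzz" ∧ k.2 ∈ pvSf) ∨
    (k.1 = "bizzfuzz" ∧ k.2 ∈ pvSz) := by decide

theorem pv_next_bizz : ∀ n ∈ (PySem.List.pyRange 3 101 3).filter (fun i => !(PySem.Int.mod i 5 == 0)),
    pvConvertA (n + 1) ∈ pvSb := by decide
theorem pv_next_fuzz : ∀ n ∈ (PySem.List.pyRange 5 101 5).filter (fun i => !(PySem.Int.mod i 3 == 0)),
    pvConvertA (n + 1) ∈ pvSf := by decide
theorem pv_next_bizzfuzz : ∀ n ∈ PySem.List.pyRange 15 101 15,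
    pvConvertA (n + 1) ∈ pvSz := by decide

theorem pv_digit_case (W1 W2 : String) (h : PySem.Str.strIsdigit W1 = true) :
    solve W1 W2 = solve_alt W1 W2 := by
  simp only [solve, solve_alt, h, if_true]
  by_cases hc : pvConvertA ((PySem.Int.ofStr? W1).getD 0 + 1) = W2
  · simp [hc, List.foldl, PySem.Set.add, PySem.Set.empty, PySem.Set.len, PySem.Set.contains]
  · simp [hc, List.foldl, PySem.Set.empty, PySem.Set.len]

theorem pv_crap_crap (W1 W2 : String)
    (hA : solve W1 W2 = "crap") (hB : solve_alt W1 W2 = "crap") :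
    solve W1 W2 = solve_alt W1 W2 := by rw [hA, hB]

theorem pv_B_crap (W1 W2 : String) (hd : ¬ PySem.Str.strIsdigit W1 = true)
    (hk : (W1, W2) ∉ pvIndex.keys) : solve_alt W1 W2 = "crap" := by
  simp only [solve_alt, if_neg hd, pv_getD_not_mem _ hk]
  decide

set_option maxRecDepth 100000 in
theorem solve_spec_aux : ∀ (W1 W2 : String), solve W1 W2 = solve_alt W1 W2 := by
  intro W1 W2
  by_cases hd : PySem.Str.strIsdigit W1 = true
  · exact pv_digit_case W1 W2 hd
  · by_cases h1 : W1 = "bizz"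
    · subst h1
      by_cases hm : W2 ∈ pvSb
      · fin_cases hm <;> decide
      · refine pv_crap_crap _ _ ?_ (pv_B_crap _ _ hd ?_)
        · simp only [solve, if_neg hd]
          rw [pv_fold_none _ _ _ (fun n hn he => hm (by rw [← he]; exact pv_next_bizz n hn))]
          decide
        · intro hkm
          rcases pv_keys_shape _ hkm with ⟨h, _⟩ | ⟨_, h⟩ | ⟨h, _⟩ | ⟨h, _⟩ <;> simp_all
    · by_cases h2 : W1 = "fuzz"
      · subst h2
        by_cases hm : W2 ∈ pvSf
        · fin_cases hm <;> decide
        · refine pv_crap_crap _ _ ?_ (pv_B_crap _ _ hd ?_)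
          · simp only [solve, if_neg hd, if_neg h1]
            rw [pv_fold_none _ _ _ (fun n hn he => hm (by rw [← he]; exact pv_next_fuzz n hn))]
            decide
          · intro hkm
            rcases pv_keys_shape _ hkm with ⟨h, _⟩ | ⟨h, _⟩ | ⟨_, h⟩ | ⟨h, _⟩ <;> simp_all
      · by_cases h3 : W1 = "bizzfuzz"
        · subst h3
          by_cases hm : W2 ∈ pvSz
          · fin_cases hm <;> decide
          · refine pv_crap_crap _ _ ?_ (pv_B_crap _ _ hd ?_)
            · simp only [solve, if_neg hd, if_neg h1, if_neg h2]
              rw [pv_fold_none _ _ _ (fun n hn he => hm (by rw [← he]; exact pv_next_bizzfuzz n hn))]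
              decide
            · intro hkm
              rcases pv_keys_shape _ hkm with ⟨h, _⟩ | ⟨h, _⟩ | ⟨h, _⟩ | ⟨_, h⟩ <;> simp_all
        · refine pv_crap_crap _ _ ?_ (pv_B_crap _ _ hd ?_)
          · simp only [solve]
            rw [if_neg hd, if_neg h1, if_neg h2, if_neg h3]
            rfl
          · intro hkm
            rcases pv_keys_shape _ hkm with ⟨h, hno⟩ | ⟨h, _⟩ | ⟨h, _⟩ | ⟨h, _⟩ <;> simp_all

-- ===== VERDICT (by name: the statement is the Claim_ definition above) =====
theorem solve_spec : Claim_equal_solve := by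
  intro W1 W2 _
  exact solve_spec_aux W1 W2
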